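-- pv_equiv track=rewrite | github.com/tomyslavs/cnn2fpga | python/my_functions.py | get_conv_core_batch_vctr
-- ===== SOURCE A (Python) =====
-- def get_conv_core_batch_vctr(total_conv_cores):
-- 	conv_core_batch_vctr=[16] # first batch always at least 16 cores
-- 	rem = total_conv_cores-16 # remaining cores
-- 	while(rem>0):
-- 		if(rem>=15):
-- 			batch_size = 15
-- 		else:
-- 			batch_size = rem
-- 		conv_core_batch_vctr.extend([batch_size])
-- 		rem = rem - batch_size
-- 	return conv_core_batch_vctr
-- ===== SOURCE B (Python) =====
-- def get_conv_core_batch_vctr(total_conv_cores):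
--     result = [16]
--     rem = total_conv_cores - 16
--     if rem > 0:
--         q, r = divmod(rem, 15)
--         result += [15] * q
--         if r:
--             result.append(r)
--     return result
-- ===== Notes on version B (the rewrite author's own statement) =====
-- stated objective: simpler
-- what changed: Replaces the subtract-15-per-iteration while loop with a single divmod: the batches after the first are [15]*q plus the nonzero remainder.
import Mathlib
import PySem

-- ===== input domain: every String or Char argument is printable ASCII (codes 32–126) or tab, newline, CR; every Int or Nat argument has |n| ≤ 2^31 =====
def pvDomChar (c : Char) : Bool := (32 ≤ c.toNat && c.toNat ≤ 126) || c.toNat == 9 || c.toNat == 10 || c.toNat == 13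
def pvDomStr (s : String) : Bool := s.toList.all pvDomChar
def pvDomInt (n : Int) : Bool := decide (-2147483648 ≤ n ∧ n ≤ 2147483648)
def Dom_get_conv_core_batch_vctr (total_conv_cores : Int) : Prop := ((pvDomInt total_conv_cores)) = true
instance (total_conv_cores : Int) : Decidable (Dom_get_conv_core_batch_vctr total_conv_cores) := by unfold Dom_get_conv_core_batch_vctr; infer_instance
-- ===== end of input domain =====

-- B replaces A's repeated-subtraction while loop with one divmod; objective: simpler.

-- ===== PORT A =====
-- the while loop of A: extend acc with min(rem,15) while rem > 0
def pvLoopA (rem : Int) (acc : List Int) : List Int :=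
  if _h : rem > 0 then
    let batch_size : Int := if rem ≥ 15 then 15 else rem
    pvLoopA (rem - batch_size) (acc ++ [batch_size])
  else acc
termination_by rem.toNat
decreasing_by
  split <;> omega

def get_conv_core_batch_vctr (total_conv_cores : Int) : List Int :=
  pvLoopA (total_conv_cores - 16) [16]

-- ===== PORT B =====
def get_conv_core_batch_vctr_alt (total_conv_cores : Int) : List Int :=
  let result : List Int := [16]
  let rem := total_conv_cores - 16
  if rem > 0 then
    let q := PySem.Int.floordiv rem 15
    let r := PySem.Int.mod rem 15
    let result := result ++ List.replicate q.toNat 15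
    if r ≠ 0 then result ++ [r] else result
  else result

-- ===== PRECONDITION & SPEC =====
def Spec_get_conv_core_batch_vctr (total_conv_cores : Int) (out : List Int) : Prop := out = get_conv_core_batch_vctr_alt total_conv_cores
instance (total_conv_cores : Int) (out : List Int) : Decidable (Spec_get_conv_core_batch_vctr total_conv_cores out) := by unfold Spec_get_conv_core_batch_vctr; infer_instance

-- ===== CLAIM (what is proved, stated in full; the proofs are below) =====
def Claim_equal_get_conv_core_batch_vctr : Prop := ∀ (total_conv_cores : Int), Dom_get_conv_core_batch_vctr total_conv_cores → Spec_get_conv_core_batch_vctr total_conv_cores (get_conv_core_batch_vctr total_conv_cores)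

-- ===== LEMMAS AND PROOFS =====

-- Closed form for A's loop, by strong induction on rem (15 subtracted per step).
theorem pvLoopA_closed (n : Nat) (acc : List Int) :
    pvLoopA (n : Int) acc =
      acc ++ List.replicate (n / 15) (15 : Int) ++
        (if n % 15 ≠ 0 then [((n % 15 : Nat) : Int)] else []) := by
  induction n using Nat.strong_induction_on generalizing acc with
  | _ n ih =>
    rw [pvLoopA.eq_def]
    by_cases h0 : (n : Int) > 0
    · simp only [h0, dif_pos]
      by_cases h15 : (n : Int) ≥ 15
      · have h15' : 15 ≤ n := by exact_mod_cast h15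
        simp only [h15, if_pos]
        have : ((n : Int) - 15) = ((n - 15 : Nat) : Int) := by omega
        rw [this, ih (n - 15) (by omega)]
        have hq : (n - 15) / 15 + 1 = n / 15 := by omega
        have hr : (n - 15) % 15 = n % 15 := by omega
        rw [hr, ← hq]
        simp [List.replicate_succ]
      · have hn : 0 < n := by exact_mod_cast h0
        have hlt : n < 15 := by omega
        simp only [h15, if_neg, not_false_iff]
        rw [pvLoopA.eq_def]
        have : ¬ ((n : Int) - (n : Int) > 0) := by omega
        simp only [this, dif_neg, not_false_iff]
        have hq : n / 15 = 0 := by omega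
        have hr : n % 15 = n := by omega
        have hne : n % 15 ≠ 0 := by omega
        have hne0 : ¬ n = 0 := by omega
        simp [hq, hr, hne0]
    · have hn : n = 0 := by omega
      subst hn
      simp

theorem get_conv_core_batch_vctr_eq (t : Int) :
    get_conv_core_batch_vctr t = get_conv_core_batch_vctr_alt t := by
  unfold get_conv_core_batch_vctr get_conv_core_batch_vctr_alt
  by_cases h : t - 16 > 0
  · have hn : t - 16 = ((t - 16).toNat : Int) := by omega
    simp only [h, if_pos]
    rw [hn, pvLoopA_closed]
    set n := (t - 16).toNat with hndef
    have hq : PySem.Int.floordiv ((n : Int)) 15 = ((n / 15 : Nat) : Int) := by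
      simp only [PySem.Int.floordiv]
      rw [Int.fdiv_eq_ediv]
      simp
    have hr : PySem.Int.mod ((n : Int)) 15 = ((n % 15 : Nat) : Int) := by
      simp only [PySem.Int.mod]
      rw [Int.fmod_eq_emod]
      simp
    rw [hq, hr]
    have htn : ((n / 15 : Nat) : Int).toNat = n / 15 := by omega
    rw [htn]
    by_cases hm : n % 15 = 0
    · simp [hm]
    · have hne : ((n % 15 : Nat) : Int) ≠ 0 := by omega
      simp [hm]
      omega
  · rw [pvLoopA.eq_def]
    have h' : ¬ 16 < t := by omega
    simp [h']

-- ===== VERDICT (by name: the statement is the Claim_ definition above) =====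
theorem get_conv_core_batch_vctr_spec : Claim_equal_get_conv_core_batch_vctr := by
  intro t _
  exact get_conv_core_batch_vctr_eq t
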